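-- pv_equiv track=rewrite | github.com/y-kitamu/data_fetcher | scripts/fetch_data_from_edinet.py | get_parent_root_doc_info
-- ===== SOURCE A (Python) =====
-- def get_parent_root_doc_info(doc_id: str | None, doc_list: list[list[str]]):
--     if doc_id is None:
--         return None
--
--     for doc in doc_list:
--         if doc[0] == doc_id:
--             if doc[-1] is not None:
--                 return get_parent_root_doc_info(doc[-1], doc_list)
--             return doc
--     return None
-- ===== SOURCE B (Python) =====
-- def get_parent_root_doc_info(doc_id, doc_list):
--     index = {}
--     for doc in doc_list:
--         index.setdefault(doc[0], doc)
--     current = doc_id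
--     while current is not None:
--         doc = index.get(current)
--         if doc is None:
--             return None
--         if doc[-1] is None:
--             return doc
--         current = doc[-1]
--     return None
-- ===== Notes on version B (the rewrite author's own statement) =====
-- stated objective: alternative
-- what changed: B builds a first-occurrence hash index of the rows once and then follows the parent chain with an iterative while-loop of O(1) lookups, replacing A's recursion that rescans the whole list at every step.
-- outside the precondition, e.g. on get_parent_root_doc_info('a', [['a', None], []]): A returns ['a', None], B raises IndexError; on get_parent_root_doc_info(None, [[]]): A returns None, B raises IndexError
import Mathlib
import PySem

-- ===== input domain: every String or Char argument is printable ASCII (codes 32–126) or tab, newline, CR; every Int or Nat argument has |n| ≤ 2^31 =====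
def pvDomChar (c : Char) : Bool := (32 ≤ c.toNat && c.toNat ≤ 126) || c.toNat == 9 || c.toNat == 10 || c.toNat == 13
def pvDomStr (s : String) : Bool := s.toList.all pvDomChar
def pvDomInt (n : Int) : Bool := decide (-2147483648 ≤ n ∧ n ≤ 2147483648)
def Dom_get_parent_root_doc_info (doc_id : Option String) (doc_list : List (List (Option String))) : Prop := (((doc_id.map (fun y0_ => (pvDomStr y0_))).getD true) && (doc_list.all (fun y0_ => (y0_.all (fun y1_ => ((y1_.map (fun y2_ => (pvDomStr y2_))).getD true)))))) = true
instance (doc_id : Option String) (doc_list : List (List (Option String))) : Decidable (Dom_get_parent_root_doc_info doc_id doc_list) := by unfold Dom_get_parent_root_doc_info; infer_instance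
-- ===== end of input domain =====

-- B replaces A's recursion-with-rescan by a first-occurrence index built once plus an
-- iterative parent-chain walk (alternative decomposition; return value only, no mutation).

-- ===== PORT A =====
-- the for-loop of A: first doc with doc[0] == doc_id (doc[0] raises IndexError on an
-- empty row → pyGet? none; Pre_ excludes empty rows, so the 'none' answer is unreachable)
def pvFindDoc (did : String) : List (List (Option String)) → Option (List (Option String))
  | [] => none
  | doc :: rest =>
    match PySem.List.pyGet? doc 0 with
    | none => none
    | some h => if h == some did then some doc else pvFindDoc did rest

-- A's recursion on the parent id; fuel (length+1) only makes the recursion total: under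
-- Pre_ the chain cannot revisit a head string, so it is shorter than the fuel
def pvAGo (doc_list : List (List (Option String))) : Nat → String → Option (List (Option String))
  | 0, _ => none
  | fuel+1, did =>
    match pvFindDoc did doc_list with
    | none => none
    | some doc =>
      match PySem.List.pyGet? doc (-1) with
      | none => none
      | some (some p) => pvAGo doc_list fuel p
      | some none => some doc

def get_parent_root_doc_info (doc_id : Option String) (doc_list : List (List (Option String))) : Option (List (Option String)) :=
  match doc_id with
  | none => none
  | some did => pvAGo doc_list (doc_list.length + 1) did

-- ===== PORT B =====
-- index.setdefault(doc[0], doc) over the rows (doc[0] raises on an empty row: excluded by Pre_)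
def pvBuildIndex (doc_list : List (List (Option String))) : PySem.Dict (Option String) (List (Option String)) :=
  doc_list.foldl (fun d doc =>
    match PySem.List.pyGet? doc 0 with
    | none => d
    | some h => d.setdefault h doc) PySem.Dict.empty

-- the while-loop of B; fuel only makes the loop total (see pvAGo's comment)
def pvBLoop (index : PySem.Dict (Option String) (List (Option String))) : Nat → Option String → Option (List (Option String))
  | _, none => none
  | 0, some _ => none
  | fuel+1, some cur =>
    match index.get? (some cur) with
    | none => none
    | some doc =>
      match PySem.List.pyGet? doc (-1) with
      | none => none
      | some none => some doc
      | some (some p) => pvBLoop index fuel (some p)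

def get_parent_root_doc_info_alt (doc_id : Option String) (doc_list : List (List (Option String))) : Option (List (Option String)) :=
  pvBLoop (pvBuildIndex doc_list) (doc_list.length + 1) doc_id

-- ===== PRECONDITION & SPEC =====
-- parent step of the first-match graph: the parent string of the first row headed by k, if any
def pvStep (doc_list : List (List (Option String))) (k : String) : Option String :=
  (doc_list.find? (fun doc => doc.head? == some (some k))).bind (fun doc => doc.getLast?.join)

-- a nonempty set of head strings each of whose parent step stays inside the set (a cycle certificate)
def pvCyclic (doc_list : List (List (Option String))) (S : List String) : Bool :=
  !S.isEmpty && S.all (fun k =>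
    match pvStep doc_list k with
    | some p => S.contains p
    | none => false)

-- the parent chain from doc_id terminates: some step-closed, cycle-free set of strings contains it
def pvChainTerminates (doc_id : Option String) (doc_list : List (List (Option String))) : Bool :=
  match doc_id with
  | none => true
  | some k0 =>
    (k0 :: doc_list.filterMap (fun d => d.head?.join)).sublists.any (fun T =>
      T.contains k0 &&
      T.all (fun k =>
        match pvStep doc_list k with
        | some p => T.contains p
        | none => true) &&
      !(T.sublists.any (fun S => pvCyclic doc_list S)))

-- Pre_ excludes inputs containing an empty row (on which doc[0] raises IndexError in A's scan
-- or in B's index building) and inputs whose parent chain from doc_id never terminates (on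
-- which A raises RecursionError and B loops forever).
def Pre_get_parent_root_doc_info (doc_id : Option String) (doc_list : List (List (Option String))) : Prop :=
  (∀ doc ∈ doc_list, doc ≠ []) ∧ pvChainTerminates doc_id doc_list = true
instance (doc_id : Option String) (doc_list : List (List (Option String))) : Decidable (Pre_get_parent_root_doc_info doc_id doc_list) := by unfold Pre_get_parent_root_doc_info; infer_instance

def pvWitness_get_parent_root_doc_info : Option String × List (List (Option String)) :=
  (some "a", [[some "a", some "b"], [some "b", none]])

def Spec_get_parent_root_doc_info (doc_id : Option String) (doc_list : List (List (Option String))) (out : Option (List (Option String))) : Prop := out = get_parent_root_doc_info_alt doc_id doc_list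
instance (doc_id : Option String) (doc_list : List (List (Option String))) (out : Option (List (Option String))) : Decidable (Spec_get_parent_root_doc_info doc_id doc_list out) := by unfold Spec_get_parent_root_doc_info; infer_instance

-- ===== CLAIM (what is proved, stated in full; the proofs are below) =====
def Claim_equal_get_parent_root_doc_info : Prop := ∀ (doc_id : Option String) (doc_list : List (List (Option String))), Dom_get_parent_root_doc_info doc_id doc_list → Pre_get_parent_root_doc_info doc_id doc_list → Spec_get_parent_root_doc_info doc_id doc_list (get_parent_root_doc_info doc_id doc_list)

-- ===== LEMMAS AND PROOFS =====

-- A's scan, on a list without empty rows, is the first-match search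
theorem pvFindDoc_eq_find (did : String) :
    ∀ docs : List (List (Option String)), (∀ doc ∈ docs, doc ≠ []) →
    pvFindDoc did docs = docs.find? (fun doc => PySem.List.pyGet? doc 0 == some (some did)) := by
  intro docs
  induction docs with
  | nil => intro _; rfl
  | cons doc rest ih =>
    intro h
    have hdoc : doc ≠ [] := h doc (List.mem_cons_self)
    obtain ⟨a, as, rfl⟩ := List.exists_cons_of_ne_nil hdoc
    have hget : PySem.List.pyGet? (a :: as) 0 = some a := by
      simp [PySem.List.pyGet?, PySem.List.pyIdx?]
    have hrest := ih (fun d hd => h d (List.mem_cons_of_mem _ hd))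
    by_cases hm : a = some did
    · simp [pvFindDoc, hm]
    · simp [pvFindDoc, hm, hrest]

-- looking up the setdefault-built index is the first-match search
theorem get?_buildIndex_aux (k : Option String) :
    ∀ (docs : List (List (Option String))) (d : PySem.Dict (Option String) (List (Option String))),
    (docs.foldl (fun d doc =>
      match PySem.List.pyGet? doc 0 with
      | none => d
      | some h => d.setdefault h doc) d).get? k =
    ((d.get? k).orElse (fun _ => docs.find? (fun doc => PySem.List.pyGet? doc 0 == some k))) := by
  intro docs
  induction docs with
  | nil => intro d; cases hd : d.get? k <;> simp [Option.orElse, hd]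
  | cons doc rest ih =>
    intro d
    simp only [List.foldl_cons, List.find?_cons]
    cases hg : PySem.List.pyGet? doc 0 with
    | none =>
      rw [ih d]
      rfl
    | some h =>
      rw [ih (d.setdefault h doc)]
      by_cases hk : h = k
      · subst hk
        cases hd : d.get? h with
        | none =>
          rw [PySem.Dict.setdefault_of_not_contains _ _ (by
            rw [PySem.Dict.contains_eq_isSome_get?, hd]; rfl)]
          rw [PySem.Dict.get?_insert_self]
          simp [Option.orElse]
        | some v =>
          rw [PySem.Dict.setdefault_of_contains _ _ (by
            rw [PySem.Dict.contains_eq_isSome_get?, hd]; rfl)]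
          simp [hd, Option.orElse]
      · have hpred : (some h == some k) = false := by simp [hk]
        rw [PySem.Dict.get?_setdefault_of_ne]
        · simp only [hpred]
        · exact fun e => hk e.symm

theorem get?_buildIndex (doc_list : List (List (Option String))) (k : Option String) :
    (pvBuildIndex doc_list).get? k =
    doc_list.find? (fun doc => PySem.List.pyGet? doc 0 == some k) := by
  unfold pvBuildIndex
  rw [get?_buildIndex_aux]
  simp [PySem.Dict.get?_empty, Option.orElse]

-- the two chain walks agree step for step (same fuel, same chain)
theorem loop_eq (doc_list : List (List (Option String)))
    (hne : ∀ doc ∈ doc_list, doc ≠ []) :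
    ∀ (fuel : Nat) (did : String),
    pvAGo doc_list fuel did = pvBLoop (pvBuildIndex doc_list) fuel (some did) := by
  intro fuel
  induction fuel with
  | zero => intro did; rfl
  | succ n ih =>
    intro did
    have hfe : pvFindDoc did doc_list = (pvBuildIndex doc_list).get? (some did) := by
      rw [pvFindDoc_eq_find did _ hne, get?_buildIndex]
    cases hget : (pvBuildIndex doc_list).get? (some did) with
    | none => simp only [pvAGo, pvBLoop, hfe, hget]
    | some doc =>
      simp only [pvAGo, pvBLoop, hfe, hget]
      cases hlast : PySem.List.pyGet? doc (-1) with
      | none => rfl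
      | some l =>
        cases l with
        | none => rfl
        | some p => exact ih p

-- ===== VERDICT (by name: the statement is the Claim_ definition above) =====
theorem get_parent_root_doc_info_spec : Claim_equal_get_parent_root_doc_info := by
  intro doc_id doc_list _ hpre
  unfold Spec_get_parent_root_doc_info get_parent_root_doc_info get_parent_root_doc_info_alt
  cases doc_id with
  | none => rfl
  | some did => exact loop_eq doc_list hpre.1 (doc_list.length + 1) did
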